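-- pv_equiv track=rewrite | github.com/alephic/e2e-coref | partition_data.py | remove_genre_conll
-- ===== SOURCE A (Python) =====
-- def remove_genre_conll(lines, genre_code):
--     filtered = []
--     in_doc = False
--     for line in lines:
--         if line.startswith("#begin document (" + genre_code):
--             in_doc = True
--         if not in_doc:
--             filtered.append(line)
--         if line.startswith("#end document"):
--             in_doc = False
--     return filtered
-- ===== SOURCE B (Python) =====
-- def remove_genre_conll(lines, genre_code):
--     filtered = []
--     begin_marker = "#begin document (" + genre_code
--     it = iter(lines)
--     for line in it:
--         if line.startswith(begin_marker):
--             for inner in it: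
--                 if inner.startswith("#end document"):
--                     break
--         else:
--             filtered.append(line)
--     return filtered
-- ===== Notes on version B (the rewrite author's own statement) =====
-- stated objective: idiomatic
-- what changed: Replaced the flat in_doc boolean state machine with a nested skip-the-span loop over a shared iterator (an inner loop consumes everything up to and including the first '#end document' line), and the begin marker string is built once instead of being re-concatenated for every line.
import Mathlib
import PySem

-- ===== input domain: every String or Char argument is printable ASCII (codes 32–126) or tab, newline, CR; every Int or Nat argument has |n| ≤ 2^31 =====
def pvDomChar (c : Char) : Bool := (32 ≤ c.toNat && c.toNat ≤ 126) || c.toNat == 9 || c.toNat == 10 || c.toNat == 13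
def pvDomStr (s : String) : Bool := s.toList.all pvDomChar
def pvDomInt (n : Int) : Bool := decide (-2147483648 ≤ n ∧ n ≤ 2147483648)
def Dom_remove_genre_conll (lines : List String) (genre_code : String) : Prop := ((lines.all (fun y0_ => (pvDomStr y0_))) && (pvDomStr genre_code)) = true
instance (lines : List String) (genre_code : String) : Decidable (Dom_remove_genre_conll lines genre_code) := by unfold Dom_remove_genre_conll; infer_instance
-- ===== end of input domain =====

-- B replaces A's flat in_doc boolean state machine with a nested skip-the-span loop (idiomatic decomposition; same cost).

-- ===== PORT A =====
-- the body of A's for-loop: the three ifs over the state (filtered, in_doc), in order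
def remove_genre_conll_step (genre_code : String) (st : List String × Bool) (line : String) : List String × Bool :=
  let in_doc := if PySem.Str.startswith line ("#begin document (" ++ genre_code) then true else st.2
  let filtered := if in_doc = false then st.1 ++ [line] else st.1
  let in_doc := if PySem.Str.startswith line "#end document" then false else in_doc
  (filtered, in_doc)

def remove_genre_conll (lines : List String) (genre_code : String) : List String :=
  (lines.foldl (remove_genre_conll_step genre_code) ([], false)).1

-- ===== PORT B =====
-- outer loop over the shared iterator: append, or hand the rest to the inner skip loop
mutual
def remove_genre_conll_main (genre_code : String) : List String → List String
  | [] => []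
  | line :: rest =>
    if PySem.Str.startswith line ("#begin document (" ++ genre_code) then
      remove_genre_conll_skip genre_code rest
    else
      line :: remove_genre_conll_main genre_code rest
-- inner loop: drop lines up to and including the first '#end document' line
def remove_genre_conll_skip (genre_code : String) : List String → List String
  | [] => []
  | inner :: rest =>
    if PySem.Str.startswith inner "#end document" then
      remove_genre_conll_main genre_code rest
    else
      remove_genre_conll_skip genre_code rest
end

def remove_genre_conll_alt (lines : List String) (genre_code : String) : List String :=
  remove_genre_conll_main genre_code lines

-- ===== PRECONDITION & SPEC =====
def Spec_remove_genre_conll (lines : List String) (genre_code : String) (out : List String) : Prop := out = remove_genre_conll_alt lines genre_code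
instance (lines : List String) (genre_code : String) (out : List String) : Decidable (Spec_remove_genre_conll lines genre_code out) := by unfold Spec_remove_genre_conll; infer_instance

-- ===== CLAIM (what is proved, stated in full; the proofs are below) =====
def Claim_equal_remove_genre_conll : Prop := ∀ (lines : List String) (genre_code : String), Dom_remove_genre_conll lines genre_code → Spec_remove_genre_conll lines genre_code (remove_genre_conll lines genre_code)

-- ===== LEMMAS AND PROOFS =====

-- a line starting with "#begin document (" ++ g cannot also start with "#end document" (second char 'b' vs 'e')
theorem pv_begin_not_end (l g : String)
    (h : PySem.Str.startswith l ("#begin document (" ++ g) = true) :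
    PySem.Str.startswith l "#end document" = false := by
  by_contra hc
  rw [Bool.not_eq_false] at hc
  rw [PySem.Str.startswith_eq, PySem.Chars.startswith_iff] at h hc
  obtain ⟨t1, h1⟩ := h
  obtain ⟨t2, h2⟩ := hc
  rw [String.toList_append, List.append_assoc] at h1
  have e1 : l.toList[1]? = some 'b' := by
    rw [← h1, List.getElem?_append_left (by decide)]; decide
  have e2 : l.toList[1]? = some 'e' := by
    rw [← h2, List.getElem?_append_left (by decide)]; decide
  rw [e1] at e2
  simp at e2

-- loop invariant: A's fold from state (acc, b) produces acc ++ (B's skip loop if b else B's main loop)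
theorem pv_fold_eq (g : String) :
    ∀ (ls acc : List String) (b : Bool),
      (ls.foldl (remove_genre_conll_step g) (acc, b)).1 =
        acc ++ (if b then remove_genre_conll_skip g ls else remove_genre_conll_main g ls) := by
  intro ls
  induction ls with
  | nil =>
    intro acc b
    cases b <;> simp only [List.foldl_nil, remove_genre_conll_main, remove_genre_conll_skip,
      Bool.false_eq_true, if_true, if_false, List.append_nil]
  | cons l rest ih =>
    intro acc b
    rw [List.foldl_cons]
    cases b with
    | true =>
      by_cases he : PySem.Str.startswith l "#end document" = true
      · have hstep : remove_genre_conll_step g (acc, true) l = (acc, false) := by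
          simp only [remove_genre_conll_step, he, if_true]
          split <;> rfl
        rw [hstep, ih]
        simp only [remove_genre_conll_skip, he, if_true, Bool.false_eq_true, if_false]
      · rw [Bool.not_eq_true] at he
        have hstep : remove_genre_conll_step g (acc, true) l = (acc, true) := by
          simp only [remove_genre_conll_step, he, Bool.false_eq_true, if_false]
          split <;> rfl
        rw [hstep, ih]
        simp only [remove_genre_conll_skip, he, Bool.false_eq_true, if_false, if_true]
    | false =>
      by_cases hb : PySem.Str.startswith l ("#begin document (" ++ g) = true
      · have he := pv_begin_not_end l g hb
        have hstep : remove_genre_conll_step g (acc, false) l = (acc, true) := by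
          simp only [remove_genre_conll_step, hb, he, if_true, Bool.false_eq_true, if_false]
          simp
        have hmain : remove_genre_conll_main g (l :: rest) = remove_genre_conll_skip g rest := by
          simp only [remove_genre_conll_main]
          rw [if_pos hb]
        rw [hstep, ih, if_pos rfl, hmain]
        simp
      · rw [Bool.not_eq_true] at hb
        have hstep : remove_genre_conll_step g (acc, false) l = (acc ++ [l], false) := by
          simp only [remove_genre_conll_step, hb, Bool.false_eq_true, if_false]
          by_cases hE : PySem.Str.startswith l "#end document" = true
          · rw [if_pos hE]; simp
          · rw [if_neg hE]; simp
        have hmain : remove_genre_conll_main g (l :: rest) = l :: remove_genre_conll_main g rest := by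
          simp only [remove_genre_conll_main]
          rw [if_neg (by rw [hb]; decide)]
        rw [hstep, ih, if_neg (by simp), hmain, List.append_assoc, List.singleton_append]
        simp

-- ===== VERDICT (by name: the statement is the Claim_ definition above) =====
theorem remove_genre_conll_spec : Claim_equal_remove_genre_conll := by
  intro lines genre_code _
  show remove_genre_conll lines genre_code = remove_genre_conll_alt lines genre_code
  rw [remove_genre_conll, remove_genre_conll_alt, pv_fold_eq, if_neg (by simp)]
  simp
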